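-- pv_equiv track=rewrite | github.com/vik-4994/F1_predict | scripts/export_last_two_years.py | _normalize_session_code
-- ===== SOURCE A (Python) =====
-- from typing import Any, Optional, Iterable, Dict, List, Tuple
--
-- _SESSION_ALIASES: Dict[str, set[str]] = {
--     "FP1": {"FP1", "Practice 1"},
--     "FP2": {"FP2", "Practice 2"},
--     "FP3": {"FP3", "Practice 3"},
--     "Q": {"Q", "Qualifying"},
--     "R": {"R", "Race"},
--     "S": {"S", "Sprint"},
--     "SQ": {"SQ", "Sprint Qualifying"},
--     "SS": {"SS", "Sprint Shootout"},
-- }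
--
-- def _normalize_session_code(name: object) -> Optional[str]:
--     text = str(name or "").strip()
--     if not text:
--         return None
--     upper = text.upper()
--     for code, aliases in _SESSION_ALIASES.items():
--         if text in aliases or upper in {alias.upper() for alias in aliases}:
--             return code
--     return None
-- ===== SOURCE B (Python) =====
-- from typing import Any, Optional, Iterable, Dict, List, Tuple
--
-- _SESSION_ALIASES: Dict[str, set[str]] = {
--     "FP1": {"FP1", "Practice 1"},
--     "FP2": {"FP2", "Practice 2"},
--     "FP3": {"FP3", "Practice 3"},
--     "Q": {"Q", "Qualifying"},
--     "R": {"R", "Race"},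
--     "S": {"S", "Sprint"},
--     "SQ": {"SQ", "Sprint Qualifying"},
--     "SS": {"SS", "Sprint Shootout"},
-- }
--
-- # Prebuilt reverse index: uppercased alias -> canonical code (exact matches are
-- # subsumed by the uppercase lookup).
-- _REVERSE: Dict[str, str] = {
--     alias.upper(): code
--     for code, aliases in _SESSION_ALIASES.items()
--     for alias in aliases
-- }
--
-- def _normalize_session_code(name: object) -> Optional[str]:
--     text = str(name or "").strip()
--     if not text:
--         return None
--     return _REVERSE.get(text.upper())
-- ===== Notes on version B (the rewrite author's own statement) =====
-- stated objective: simpler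
-- what changed: B replaces A's per-call scan over all alias groups (rebuilding an uppercased set for each group on every call) with a module-level reverse index from uppercased alias to canonical code and a single dict lookup; the uppercase lookup subsumes A's exact-match test.
import Mathlib
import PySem

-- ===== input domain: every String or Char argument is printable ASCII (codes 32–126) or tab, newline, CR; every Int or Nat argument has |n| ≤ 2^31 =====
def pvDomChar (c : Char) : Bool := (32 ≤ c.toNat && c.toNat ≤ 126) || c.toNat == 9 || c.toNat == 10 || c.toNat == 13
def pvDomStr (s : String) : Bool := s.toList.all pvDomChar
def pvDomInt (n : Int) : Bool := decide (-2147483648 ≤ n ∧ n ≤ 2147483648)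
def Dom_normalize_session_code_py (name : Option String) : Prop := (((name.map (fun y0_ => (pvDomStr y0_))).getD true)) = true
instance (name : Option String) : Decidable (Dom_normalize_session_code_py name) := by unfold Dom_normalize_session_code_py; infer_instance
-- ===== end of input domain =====

-- B replaces A's per-call scan over the alias groups (with a fresh uppercased set per group)
-- by one lookup in a prebuilt reverse index from uppercased alias to code (objective: simpler).

-- ===== PORT A =====
-- _SESSION_ALIASES: each set[str] as a List String of its distinct elements
def sessionAliases : List (String × List String) :=
  [("FP1", ["FP1", "Practice 1"]),
   ("FP2", ["FP2", "Practice 2"]),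
   ("FP3", ["FP3", "Practice 3"]),
   ("Q",   ["Q", "Qualifying"]),
   ("R",   ["R", "Race"]),
   ("S",   ["S", "Sprint"]),
   ("SQ",  ["SQ", "Sprint Qualifying"]),
   ("SS",  ["SS", "Sprint Shootout"])]

-- the for-loop over _SESSION_ALIASES.items() with its early return
def aliasScan (text upper : String) : List (String × List String) → Option String
  | [] => none
  | (code, aliases) :: rest =>
      if text ∈ aliases ∨ upper ∈ aliases.map PySem.Str.upper then some code
      else aliasScan text upper rest

def normalize_session_code_py (name : Option String) : Option String :=
  let text := PySem.Str.strip (name.getD "")   -- str(name or "").strip(): None and "" both give ""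
  if text = "" then none
  else aliasScan text (PySem.Str.upper text) sessionAliases

-- ===== PORT B =====
-- _REVERSE: prebuilt reverse index, uppercased alias -> code
def reverseIndex : PySem.Dict String String :=
  PySem.Dict.ofList
    [("FP1", "FP1"), ("PRACTICE 1", "FP1"),
     ("FP2", "FP2"), ("PRACTICE 2", "FP2"),
     ("FP3", "FP3"), ("PRACTICE 3", "FP3"),
     ("Q", "Q"), ("QUALIFYING", "Q"),
     ("R", "R"), ("RACE", "R"),
     ("S", "S"), ("SPRINT", "S"),
     ("SQ", "SQ"), ("SPRINT QUALIFYING", "SQ"),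
     ("SS", "SS"), ("SPRINT SHOOTOUT", "SS")]

def normalize_session_code_py_alt (name : Option String) : Option String :=
  let text := PySem.Str.strip (name.getD "")
  if text = "" then none
  else PySem.Dict.get? reverseIndex (PySem.Str.upper text)

-- ===== PRECONDITION & SPEC =====
def Spec_normalize_session_code_py (name : Option String) (out : Option String) : Prop := out = normalize_session_code_py_alt name
instance (name : Option String) (out : Option String) : Decidable (Spec_normalize_session_code_py name out) := by unfold Spec_normalize_session_code_py; infer_instance

-- ===== CLAIM (what is proved, stated in full; the proofs are below) =====
def Claim_equal_normalize_session_code_py : Prop := ∀ (name : Option String), Dom_normalize_session_code_py name → Spec_normalize_session_code_py name (normalize_session_code_py name)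

-- ===== LEMMAS AND PROOFS =====

-- uppercasing the alias literals (computed once, cited below)
theorem up1 : PySem.Str.upper "Practice 1" = "PRACTICE 1" := by decide
theorem up2 : PySem.Str.upper "Practice 2" = "PRACTICE 2" := by decide
theorem up3 : PySem.Str.upper "Practice 3" = "PRACTICE 3" := by decide
theorem up4 : PySem.Str.upper "Qualifying" = "QUALIFYING" := by decide
theorem up5 : PySem.Str.upper "Race" = "RACE" := by decide
theorem up6 : PySem.Str.upper "Sprint" = "SPRINT" := by decide
theorem up7 : PySem.Str.upper "Sprint Qualifying" = "SPRINT QUALIFYING" := by decide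
theorem up8 : PySem.Str.upper "Sprint Shootout" = "SPRINT SHOOTOUT" := by decide
theorem vp1 : PySem.Str.upper "FP1" = "FP1" := by decide
theorem vp2 : PySem.Str.upper "FP2" = "FP2" := by decide
theorem vp3 : PySem.Str.upper "FP3" = "FP3" := by decide
theorem vp4 : PySem.Str.upper "Q" = "Q" := by decide
theorem vp5 : PySem.Str.upper "R" = "R" := by decide
theorem vp6 : PySem.Str.upper "S" = "S" := by decide
theorem vp7 : PySem.Str.upper "SQ" = "SQ" := by decide
theorem vp8 : PySem.Str.upper "SS" = "SS" := by decide

-- In each group, 'text ∈ aliases' implies 'upper text ∈ map upper aliases', so (as long as no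
-- group contains the empty string) the exact-match test is subsumed by the uppercase test.
theorem aliasScan_eq_upperOnly (text : String) (l : List (String × List String))
    (hl : ∀ g ∈ l, ("" : String) ∉ g.2) :
    aliasScan text (PySem.Str.upper text) l =
      aliasScan "" (PySem.Str.upper text) l := by
  induction l with
  | nil => rfl
  | cons hd tl ih =>
    obtain ⟨code, aliases⟩ := hd
    have h0 : ("" : String) ∉ aliases := hl (code, aliases) List.mem_cons_self
    have htl : ∀ g ∈ tl, ("" : String) ∉ g.2 := fun g hg => hl g (List.mem_cons_of_mem _ hg)
    simp only [aliasScan]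
    by_cases h : PySem.Str.upper text ∈ aliases.map PySem.Str.upper
    · simp [h]
    · have hnot : text ∉ aliases := fun hm => h (List.mem_map_of_mem hm)
      simp [h0, h, hnot, ih htl]

-- the reverse index, evaluated to its underlying items list
theorem hmk : reverseIndex = PySem.Dict.mk [("FP1", "FP1"), ("PRACTICE 1", "FP1"), ("FP2", "FP2"), ("PRACTICE 2", "FP2"), ("FP3", "FP3"), ("PRACTICE 3", "FP3"), ("Q", "Q"), ("QUALIFYING", "Q"), ("R", "R"), ("RACE", "R"), ("S", "S"), ("SPRINT", "S"), ("SQ", "SQ"), ("SPRINT QUALIFYING", "SQ"), ("SS", "SS"), ("SPRINT SHOOTOUT", "SS")] := by decide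

-- For any string u, the scan keyed only on u equals the reverse-index lookup.
theorem scan_eq_lookup (u : String) :
    aliasScan "" u sessionAliases = PySem.Dict.get? reverseIndex u := by
  simp only [sessionAliases, aliasScan, List.map, List.mem_cons, List.not_mem_nil, or_false,
    up1, up2, up3, up4, up5, up6, up7, up8, vp1, vp2, vp3, vp4, vp5, vp6, vp7, vp8]
  by_cases h1 : u = "FP1"
  · subst h1; decide
  by_cases h2 : u = "PRACTICE 1"
  · subst h2; decide
  by_cases h3 : u = "FP2"
  · subst h3; decide
  by_cases h4 : u = "PRACTICE 2"
  · subst h4; decide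
  by_cases h5 : u = "FP3"
  · subst h5; decide
  by_cases h6 : u = "PRACTICE 3"
  · subst h6; decide
  by_cases h7 : u = "Q"
  · subst h7; decide
  by_cases h8 : u = "QUALIFYING"
  · subst h8; decide
  by_cases h9 : u = "R"
  · subst h9; decide
  by_cases h10 : u = "RACE"
  · subst h10; decide
  by_cases h11 : u = "S"
  · subst h11; decide
  by_cases h12 : u = "SPRINT"
  · subst h12; decide
  by_cases h13 : u = "SQ"
  · subst h13; decide
  by_cases h14 : u = "SPRINT QUALIFYING"
  · subst h14; decide
  by_cases h15 : u = "SS"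
  · subst h15; decide
  by_cases h16 : u = "SPRINT SHOOTOUT"
  · subst h16; decide
  have b1 : ("FP1" == u) = false := beq_eq_false_iff_ne.mpr (Ne.symm h1)
  have b2 : ("PRACTICE 1" == u) = false := beq_eq_false_iff_ne.mpr (Ne.symm h2)
  have b3 : ("FP2" == u) = false := beq_eq_false_iff_ne.mpr (Ne.symm h3)
  have b4 : ("PRACTICE 2" == u) = false := beq_eq_false_iff_ne.mpr (Ne.symm h4)
  have b5 : ("FP3" == u) = false := beq_eq_false_iff_ne.mpr (Ne.symm h5)
  have b6 : ("PRACTICE 3" == u) = false := beq_eq_false_iff_ne.mpr (Ne.symm h6)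
  have b7 : ("Q" == u) = false := beq_eq_false_iff_ne.mpr (Ne.symm h7)
  have b8 : ("QUALIFYING" == u) = false := beq_eq_false_iff_ne.mpr (Ne.symm h8)
  have b9 : ("R" == u) = false := beq_eq_false_iff_ne.mpr (Ne.symm h9)
  have b10 : ("RACE" == u) = false := beq_eq_false_iff_ne.mpr (Ne.symm h10)
  have b11 : ("S" == u) = false := beq_eq_false_iff_ne.mpr (Ne.symm h11)
  have b12 : ("SPRINT" == u) = false := beq_eq_false_iff_ne.mpr (Ne.symm h12)
  have b13 : ("SQ" == u) = false := beq_eq_false_iff_ne.mpr (Ne.symm h13)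
  have b14 : ("SPRINT QUALIFYING" == u) = false := beq_eq_false_iff_ne.mpr (Ne.symm h14)
  have b15 : ("SS" == u) = false := beq_eq_false_iff_ne.mpr (Ne.symm h15)
  have b16 : ("SPRINT SHOOTOUT" == u) = false := beq_eq_false_iff_ne.mpr (Ne.symm h16)
  rw [hmk]
  simp only [PySem.Dict.get?_mk_cons, b1, b2, b3, b4, b5, b6, b7, b8, b9, b10, b11, b12, b13, b14, b15, b16, Bool.false_eq_true, if_false]
  simp [h1, h2, h3, h4, h5, h6, h7, h8, h9, h10, h11, h12, h13, h14, h15, h16, PySem.Dict.get?]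

-- ===== VERDICT (by name: the statement is the Claim_ definition above) =====
theorem normalize_session_code_py_spec : Claim_equal_normalize_session_code_py := by
  intro name _
  unfold Spec_normalize_session_code_py normalize_session_code_py normalize_session_code_py_alt
  by_cases h : PySem.Str.strip (name.getD "") = ""
  · simp [h]
  · have he : ∀ g ∈ sessionAliases, ("" : String) ∉ g.2 := by decide
    simp [h, aliasScan_eq_upperOnly _ _ he, scan_eq_lookup]
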